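-- pv_equiv track=rewrite | github.com/mciniselli/conditions_bugfix | construct_processing.py | FindBrackets
-- ===== SOURCE A (Python) =====
-- def is_in_string(starts, ends, position):
--     for x, y in zip(starts, ends):
--         if position > x and position < y:
--             return True
--     return False
--
-- def FindBrackets(code, starts, ends, position):
--     len_=len(code)
--
--     start=-1
--     end=-1
--     count_open=0
--     count_closed=0
--
--     for i in range(position, len_):
--         if code[i]=="(":
--             is_string=is_in_string(starts, ends, i)
--             if not is_string:
--                 count_open+=1
--                 if start==-1:
--                     start=i
--         elif code[i]==")":
--             is_string=is_in_string(starts, ends, i)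
--             if not is_string:
--                 count_closed+=1
--         if count_open==count_closed and count_open>0:
--             end=i
--             return start, end
--
--     return -1, -1
-- ===== SOURCE B (Python) =====
-- def FindBrackets(code, starts, ends, position):
--     n = len(code)
--     lo = position
--     W = max(0, n - lo)
--     delta = [0] * (W + 1)
--     for x, y in zip(starts, ends):
--         a = max(lo, x + 1)
--         b = min(n, y)
--         if a < b:
--             delta[a - lo] += 1
--             delta[b - lo] -= 1
--     covered = []
--     run = 0
--     for d in delta[:W]:
--         run += d
--         covered.append(run > 0)
--     events = [(i, code[i]) for i in range(lo, n)
--               if code[i] in "()" and not covered[i - lo]]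
--     start = -1
--     opens = 0
--     closes = 0
--     for i, c in events:
--         if c == "(":
--             opens += 1
--             if start == -1:
--                 start = i
--         else:
--             closes += 1
--         if opens == closes and opens > 0:
--             return start, i
--     return -1, -1
-- ===== Notes on version B (the rewrite author's own statement) =====
-- stated objective: alternative
-- what changed: B precomputes string coverage of the scanned window once via a difference array summed into a boolean mask, then scans a compressed list of uncovered-bracket events, instead of A's re-scan of all (start,end) pairs at every bracket character; it trades A's early-exit laziness for an eager O(n+m) precomputation.
import Mathlib
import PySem

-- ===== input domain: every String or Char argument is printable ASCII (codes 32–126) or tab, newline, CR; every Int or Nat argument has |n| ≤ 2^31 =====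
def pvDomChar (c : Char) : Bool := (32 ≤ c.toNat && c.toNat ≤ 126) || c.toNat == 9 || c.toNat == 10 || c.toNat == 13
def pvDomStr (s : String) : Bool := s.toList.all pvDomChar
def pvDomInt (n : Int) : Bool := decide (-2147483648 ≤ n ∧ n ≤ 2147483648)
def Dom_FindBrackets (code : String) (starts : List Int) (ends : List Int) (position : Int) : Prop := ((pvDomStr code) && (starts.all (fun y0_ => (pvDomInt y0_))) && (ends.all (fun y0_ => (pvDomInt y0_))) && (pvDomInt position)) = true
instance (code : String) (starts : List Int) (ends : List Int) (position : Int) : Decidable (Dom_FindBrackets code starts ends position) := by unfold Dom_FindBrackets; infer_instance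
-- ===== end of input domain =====

-- B precomputes string coverage of the scanned window once, by a difference array summed into
-- a boolean mask, then scans a compressed list of uncovered-bracket events (objective: alternative).

-- ===== PORT A =====
-- is_in_string: loop over zip(starts, ends) with early return True
def isInStringGo : List (Int × Int) → Int → Bool
  | [], _ => false
  | (x, y) :: rest, position =>
    if position > x ∧ position < y then true else isInStringGo rest position

def isInString (starts ends : List Int) (position : Int) : Bool :=
  isInStringGo (starts.zip ends) position

-- the if/elif ladder of one iteration of A's loop: new (start, count_open, count_closed)
def bracketStep (starts ends : List Int) (i : Int) (ch : Char) (start co cc : Int) :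
    Int × Int × Int :=
  if ch = '(' then
    if !(isInString starts ends i) then ((if start = -1 then i else start), co + 1, cc)
    else (start, co, cc)
  else if ch = ')' then
    if !(isInString starts ends i) then (start, co, cc + 1)
    else (start, co, cc)
  else (start, co, cc)

-- the 'for i in range(position, len_)' loop of A, state (start, count_open, count_closed);
-- end_ is only ever assigned immediately before a return, so it is not loop state
def FindBracketsLoop (code : List Char) (starts ends : List Int) :
    List Int → Int → Int → Int → Int × Int
  | [], _, _, _ => (-1, -1)
  | i :: rest, start, co, cc =>
    match PySem.List.pyGet? code i with
    | none => (-1, -1)  -- IndexError in Python; excluded by Pre_FindBrackets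
    | some ch =>
      match bracketStep starts ends i ch start co cc with
      | (start', co', cc') =>
        if co' = cc' ∧ co' > 0 then (start', i)
        else FindBracketsLoop code starts ends rest start' co' cc'

def FindBrackets (code : String) (starts : List Int) (ends : List Int) (position : Int) : Int × Int :=
  let len_ : Int := PySem.Str.len code
  FindBracketsLoop code.toList starts ends (PySem.List.pyRange position len_ 1) (-1) 0 0

-- ===== PORT B =====
-- for x, y in zip(starts, ends): a = max(lo, x+1); b = min(n, y); if a < b: delta[a-lo] += 1; delta[b-lo] -= 1
-- (both indices are always within the list here, since lo ≤ a < b ≤ n and len(delta) = max(0, n-lo)+1)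
def altDelta (n lo : Int) (pairs : List (Int × Int)) (delta0 : List Int) : List Int :=
  pairs.foldl
    (fun d p =>
      let a := max lo (p.1 + 1)
      let b := min n p.2
      if a < b then
        let d1 := d.set (a - lo).toNat (d.getD (a - lo).toNat 0 + 1)
        d1.set (b - lo).toNat (d1.getD (b - lo).toNat 0 - 1)
      else d)
    delta0

-- run = 0; for d in delta[:W]: run += d; covered.append(run > 0)
def altMask (delta : List Int) (W : Int) : List Bool :=
  ((PySem.List.slice delta none (some W)).foldl
    (fun (s : List Bool × Int) d => (s.1 ++ [decide (s.2 + d > 0)], s.2 + d)) ([], 0)).1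

-- events = [(i, code[i]) for i in range(lo, n) if code[i] in "()" and not covered[i - lo]]
-- (i - lo is always within the mask here, so the pyGetD default is never reached)
def altEvents (code : List Char) (lo : Int) (mask : List Bool) (idxs : List Int) : List (Int × Char) :=
  idxs.filterMap (fun i =>
    match PySem.List.pyGet? code i with
    | none => none  -- IndexError in Python; excluded by Pre_FindBrackets
    | some c =>
      if (c = '(' ∨ c = ')') ∧ ¬ PySem.List.pyGetD mask (i - lo) false then some (i, c) else none)

-- one event's update of (start, opens, closes): every event is '(' or ')'
def altStep (i : Int) (c : Char) (start opens closes : Int) : Int × Int × Int :=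
  if c = '(' then ((if start = -1 then i else start), opens + 1, closes)
  else (start, opens, closes + 1)

def altScan : List (Int × Char) → Int → Int → Int → Int × Int
  | [], _, _, _ => (-1, -1)
  | (i, c) :: rest, start, opens, closes =>
    match altStep i c start opens closes with
    | (start', opens', closes') =>
      if opens' = closes' ∧ opens' > 0 then (start', i)
      else altScan rest start' opens' closes'

def FindBrackets_alt (code : String) (starts : List Int) (ends : List Int) (position : Int) : Int × Int :=
  let n : Int := PySem.Str.len code
  let lo : Int := position
  let W : Int := max 0 (n - lo)
  let delta := altDelta n lo (starts.zip ends) (PySem.List.pyRepeat [0] (W + 1))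
  let mask := altMask delta W
  altScan (altEvents code.toList lo mask (PySem.List.pyRange lo n 1)) (-1) 0 0

-- ===== PRECONDITION & SPEC =====
-- Pre_ excludes exactly the inputs where A raises IndexError: position below -len(code).
def Pre_FindBrackets (code : String) (starts : List Int) (ends : List Int) (position : Int) : Prop :=
  -(PySem.Str.len code) ≤ position
instance (code : String) (starts : List Int) (ends : List Int) (position : Int) : Decidable (Pre_FindBrackets code starts ends position) := by unfold Pre_FindBrackets; infer_instance

def pvWitness_FindBrackets : String × List Int × List Int × Int := ("a(b)c", [0], [2], 0)

def Spec_FindBrackets (code : String) (starts : List Int) (ends : List Int) (position : Int) (out : Int × Int) : Prop := out = FindBrackets_alt code starts ends position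
instance (code : String) (starts : List Int) (ends : List Int) (position : Int) (out : Int × Int) : Decidable (Spec_FindBrackets code starts ends position out) := by unfold Spec_FindBrackets; infer_instance

-- ===== CLAIM (what is proved, stated in full; the proofs are below) =====
def Claim_equal_FindBrackets : Prop := ∀ (code : String) (starts : List Int) (ends : List Int) (position : Int), Dom_FindBrackets code starts ends position → Pre_FindBrackets code starts ends position → Spec_FindBrackets code starts ends position (FindBrackets code starts ends position)

-- ===== LEMMAS AND PROOFS =====

-- is_in_string is "some interval strictly contains position"
theorem isInStringGo_eq_true_iff (pairs : List (Int × Int)) (i : Int) :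
    isInStringGo pairs i = true ↔ ∃ p ∈ pairs, p.1 < i ∧ i < p.2 := by
  induction pairs with
  | nil => simp [isInStringGo]
  | cons hd tl ih =>
    obtain ⟨x, y⟩ := hd
    simp only [isInStringGo]
    split_ifs with h
    · simp only [true_iff]
      exact ⟨(x, y), List.mem_cons_self, h.1, h.2⟩
    · simp only [ih, List.mem_cons]
      constructor
      · rintro ⟨p, hp, h1, h2⟩; exact ⟨p, Or.inr hp, h1, h2⟩
      · rintro ⟨p, hp | hp, h1, h2⟩
        · exfalso; apply h; subst hp; exact ⟨h1, h2⟩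
        · exact ⟨p, hp, h1, h2⟩

-- a point update at index j shifts the prefix sum up to k by v exactly when j < k
theorem sum_take_set (l : List Int) (j k : Nat) (v : Int) (hj : j < l.length) :
    ((l.set j (l.getD j 0 + v)).take k).sum = (l.take k).sum + if j < k then v else 0 := by
  induction l generalizing j k with
  | nil => simp at hj
  | cons h t ih =>
    cases j with
    | zero =>
      cases k with
      | zero => simp
      | succ k' => simp; ring
    | succ j' =>
      cases k with
      | zero => simp
      | succ k' =>
        have hj' : j' < t.length := by simpa using hj
        simp only [List.set_cons_succ, List.getD_cons_succ, List.take_succ_cons, List.sum_cons,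
          Nat.succ_lt_succ_iff]
        rw [ih j' k' hj']
        ring

theorem sum_take_set_sub (l : List Int) (j k : Nat) (hj : j < l.length) :
    ((l.set j (l.getD j 0 - 1)).take k).sum = (l.take k).sum + if j < k then (-1:Int) else 0 := by
  have h := sum_take_set l j k (-1) hj
  simpa [sub_eq_add_neg] using h

theorem altDelta_length (n lo : Int) (pairs : List (Int × Int)) (d0 : List Int) :
    (altDelta n lo pairs d0).length = d0.length := by
  unfold altDelta
  induction pairs generalizing d0 with
  | nil => rfl
  | cons p t ih =>
    simp only [List.foldl_cons]
    rw [ih]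
    split_ifs <;> simp

-- prefix sums of the difference array count the pairs whose clipped interval covers the prefix end
theorem sum_take_altDelta (n lo : Int) (pairs : List (Int × Int)) (k : Nat) :
    ∀ (d0 : List Int), d0.length = (max 0 (n - lo)).toNat + 1 →
    ((altDelta n lo pairs d0).take k).sum =
      ((d0.take k).sum) +
        (pairs.countP (fun p =>
          decide (max lo (p.1 + 1) < min n p.2 ∧ max lo (p.1 + 1) - lo < (k : Int) ∧ (k : Int) ≤ min n p.2 - lo)) : Int) := by
  induction pairs with
  | nil => intro d0 _; simp [altDelta]
  | cons p t ih =>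
    intro d0 hlen
    have ha : lo ≤ max lo (p.1 + 1) := le_max_left _ _
    by_cases hab : max lo (p.1 + 1) < min n p.2
    · have hbn : min n p.2 ≤ n := min_le_left _ _
      have hblo : min n p.2 - lo ≤ max 0 (n - lo) := by omega
      have hj1 : (max lo (p.1 + 1) - lo).toNat < d0.length := by rw [hlen]; omega
      set d1 := d0.set (max lo (p.1 + 1) - lo).toNat (d0.getD (max lo (p.1 + 1) - lo).toNat 0 + 1) with hd1
      have hlen1 : d1.length = (max 0 (n - lo)).toNat + 1 := by
        rw [hd1, List.length_set, hlen]
      have hj2 : (min n p.2 - lo).toNat < d1.length := by rw [hlen1]; omega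
      set d2 := d1.set (min n p.2 - lo).toNat (d1.getD (min n p.2 - lo).toNat 0 - 1) with hd2
      have hstep : altDelta n lo (p :: t) d0 = altDelta n lo t d2 := by
        unfold altDelta
        simp only [List.foldl_cons]
        rw [if_pos hab]
      rw [hstep, ih d2 (by rw [hd2, List.length_set, hlen1])]
      rw [hd2, sum_take_set_sub d1 _ k hj2, hd1, sum_take_set d0 _ k 1 hj1]
      rw [List.countP_cons]
      have hnet : (if (max lo (p.1 + 1) - lo).toNat < k then (1:Int) else 0) +
          (if (min n p.2 - lo).toNat < k then (-1:Int) else 0) =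
          if (decide (max lo (p.1 + 1) < min n p.2 ∧ max lo (p.1 + 1) - lo < (k : Int) ∧ (k : Int) ≤ min n p.2 - lo)) = true then 1 else 0 := by
        simp only [decide_eq_true_eq]
        split_ifs <;> omega
      push_cast [List.countP_cons] at hnet ⊢
      omega
    · have hstep : altDelta n lo (p :: t) d0 = altDelta n lo t d0 := by
        unfold altDelta
        simp only [List.foldl_cons, if_neg hab]
      rw [hstep, ih d0 hlen, List.countP_cons]
      have : (decide (max lo (p.1 + 1) < min n p.2 ∧ max lo (p.1 + 1) - lo < (k : Int) ∧ (k : Int) ≤ min n p.2 - lo)) = false := by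
        simp only [decide_eq_false_iff_not]
        intro h; exact hab h.1
      rw [this]
      simp

-- the running-sum loop produces the list of prefix-sum positivity flags
theorem mask_fold (l : List Int) (acc : List Bool) (r : Int) :
    ((l.foldl (fun (s : List Bool × Int) d => (s.1 ++ [decide (s.2 + d > 0)], s.2 + d)) (acc, r)).1)
      = acc ++ (List.range l.length).map (fun j => decide (r + ((l.take (j + 1)).sum) > 0)) := by
  induction l generalizing acc r with
  | nil => simp
  | cons d t ih =>
    simp only [List.foldl_cons, ih, List.length_cons, List.range_succ_eq_map, List.map_cons,
      List.map_map]
    rw [List.append_assoc]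
    congr 1
    simp only [List.take_succ_cons, List.sum_cons, List.singleton_append]
    congr 1
    · simp
    · apply List.map_congr_left
      intro j _
      simp [Function.comp, add_assoc]

-- ===== main loop correspondence =====
-- A's char-by-char loop equals B's scan of the event list, provided every index is in range,
-- the mask is faithful on the index list, and the stopping condition does not already hold
theorem loop_eq_scan (code : List Char) (starts ends : List Int) (lo : Int) (mask : List Bool)
    (idxs : List Int)
    (hget : ∀ i ∈ idxs, (PySem.List.pyGet? code i).isSome)
    (hcov : ∀ i ∈ idxs, PySem.List.pyGetD mask (i - lo) false = isInString starts ends i)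
    (start co cc : Int) (hinv : ¬ (co = cc ∧ co > 0)) :
    FindBracketsLoop code starts ends idxs start co cc =
      altScan (altEvents code lo mask idxs) start co cc := by
  induction idxs generalizing start co cc with
  | nil => simp [FindBracketsLoop, altEvents, altScan]
  | cons i rest ih =>
    have hg := hget i List.mem_cons_self
    obtain ⟨c, hc⟩ := Option.isSome_iff_exists.mp hg
    have hcv := hcov i List.mem_cons_self
    have hget' : ∀ j ∈ rest, (PySem.List.pyGet? code j).isSome :=
      fun j hj => hget j (List.mem_cons_of_mem _ hj)
    have hcov' : ∀ j ∈ rest, PySem.List.pyGetD mask (j - lo) false = isInString starts ends j :=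
      fun j hj => hcov j (List.mem_cons_of_mem _ hj)
    simp only [FindBracketsLoop, altEvents, List.filterMap_cons, hc]
    by_cases hpar : c = '(' ∨ c = ')'
    · by_cases hstr : isInString starts ends i = true
      · -- covered bracket: no event, state unchanged
        have hco : PySem.List.pyGetD mask (i - lo) false = true := hcv.trans hstr
        have hnoev : ¬ ((c = '(' ∨ c = ')') ∧ ¬ PySem.List.pyGetD mask (i - lo) false = true) :=
          fun h => h.2 hco
        rw [if_neg hnoev]
        have hstep : bracketStep starts ends i c start co cc = (start, co, cc) := by
          unfold bracketStep
          rcases hpar with hp | hp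
          · rw [hp, if_pos rfl, hstr]; rfl
          · have hne : ¬ (c = '(') := by
              intro h; rw [h] at hp; exact absurd hp (by decide)
            rw [if_neg hne, hp, if_pos rfl, hstr]; rfl
        rw [hstep]
        simp only [if_neg hinv]
        exact ih hget' hcov' start co cc hinv
      · -- uncovered bracket: an event; both sides take the same step
        have hstr' : isInString starts ends i = false := by
          cases h : isInString starts ends i
          · rfl
          · exact absurd h hstr
        have hco : PySem.List.pyGetD mask (i - lo) false = false := hcv.trans hstr'
        have hev : ((c = '(' ∨ c = ')') ∧ ¬ PySem.List.pyGetD mask (i - lo) false = true) :=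
          ⟨hpar, by rw [hco]; simp⟩
        rw [if_pos hev]
        have hstep : bracketStep starts ends i c start co cc = altStep i c start co cc := by
          unfold bracketStep altStep
          rcases hpar with hp | hp
          · rw [hp, if_pos rfl, if_pos rfl, hstr']; rfl
          · have hne : ¬ (c = '(') := by
              intro h; rw [h] at hp; exact absurd hp (by decide)
            rw [if_neg hne, if_neg hne, hp, if_pos rfl, hstr']; rfl
        simp only [altScan, hstep]
        rcases haft : altStep i c start co cc with ⟨start', co', cc'⟩
        by_cases hstop : (co' = cc' ∧ co' > 0)
        · rw [if_pos hstop, if_pos hstop]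
        · rw [if_neg hstop, if_neg hstop]
          exact ih hget' hcov' _ _ _ hstop
    · -- not a bracket: no event, state unchanged
      have hnoev : ¬ ((c = '(' ∨ c = ')') ∧ ¬ PySem.List.pyGetD mask (i - lo) false = true) :=
        fun h => hpar h.1
      rw [if_neg hnoev]
      have h1 : ¬ (c = '(') := fun h => hpar (Or.inl h)
      have h2 : ¬ (c = ')') := fun h => hpar (Or.inr h)
      have hstep : bracketStep starts ends i c start co cc = (start, co, cc) := by
        unfold bracketStep
        rw [if_neg h1, if_neg h2]
      rw [hstep]
      simp only [if_neg hinv]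
      exact ih hget' hcov' start co cc hinv

-- for indices inside the scanned window the summed mask agrees with is_in_string
theorem mask_lookup (n lo : Int) (pairs : List (Int × Int)) (i : Int)
    (h1 : lo ≤ i) (h2 : i < n) :
    PySem.List.pyGetD
        (altMask (altDelta n lo pairs (PySem.List.pyRepeat [(0:Int)] (max 0 (n - lo) + 1))) (max 0 (n - lo)))
        (i - lo) false
      = isInStringGo pairs i := by
  set W : Int := max 0 (n - lo) with hW
  have hWpos : 0 ≤ W := le_max_left _ _
  have hd0len : (PySem.List.pyRepeat [(0:Int)] (W + 1)).length = W.toNat + 1 := by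
    rw [PySem.List.pyRepeat_singleton, List.length_replicate]; omega
  set delta := altDelta n lo pairs (PySem.List.pyRepeat [(0:Int)] (W + 1)) with hdelta
  have hdlen : delta.length = W.toNat + 1 := by
    rw [hdelta, altDelta_length, hd0len]
  -- the sliced list delta[:W]
  have hslice : PySem.List.slice delta none (some W) = delta.take W.toNat := by
    rw [PySem.List.slice_to _ hWpos]
  set j : Nat := (i - lo).toNat with hj
  have hjW : j < W.toNat := by omega
  have hmask : altMask delta W =
      (List.range (delta.take W.toNat).length).map
        (fun j => decide ((0:Int) + (((delta.take W.toNat).take (j + 1)).sum) > 0)) := by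
    unfold altMask
    rw [hslice, mask_fold, List.nil_append]
  have hlen' : (delta.take W.toNat).length = W.toNat := by
    rw [List.length_take, hdlen]; omega
  have htt : ∀ k : Nat, k ≤ W.toNat → (delta.take W.toNat).take k = delta.take k := by
    intro k hk
    rw [List.take_take]
    congr 1
    omega
  -- index into the mask
  have hget : PySem.List.pyGetD (altMask delta W) (i - lo) false =
      decide ((0:Int) + ((delta.take (j + 1)).sum) > 0) := by
    rw [PySem.List.pyGetD_of_nonneg _ _ (by omega), hmask]
    rw [List.getD_eq_getElem?_getD]
    rw [List.getElem?_map]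
    have hjlen : j < (List.range (delta.take W.toNat).length).length := by
      rw [List.length_range, hlen']; exact hjW
    rw [List.getElem?_range (by rw [hlen']; exact hjW)]
    simp only [Option.map_some, Option.getD_some]
    rw [htt (j + 1) (by omega)]
  rw [hget]
  -- evaluate the prefix sum by the difference-array lemma
  have hsum := sum_take_altDelta n lo pairs (j + 1)
      (PySem.List.pyRepeat [(0:Int)] (W + 1)) (by rw [hd0len])
  have hzero : (((PySem.List.pyRepeat [(0:Int)] (W + 1)).take (j + 1)).sum) = 0 := by
    rw [PySem.List.pyRepeat_singleton]
    rw [List.take_replicate]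
    simp
  rw [← hdelta] at hsum
  rw [hsum, hzero, zero_add, zero_add]
  -- countP > 0 ↔ some pair strictly contains i
  rcases hb : isInStringGo pairs i with _ | _
  · simp only [decide_eq_false_iff_not, not_lt]
    by_contra hpos
    rw [not_le] at hpos
    have : 0 < pairs.countP (fun p =>
        decide (max lo (p.1 + 1) < min n p.2 ∧ max lo (p.1 + 1) - lo < ((j + 1 : Nat) : Int) ∧ ((j + 1 : Nat) : Int) ≤ min n p.2 - lo)) := by
      exact_mod_cast hpos
    obtain ⟨p, hp, hpred⟩ := List.countP_pos_iff.mp this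
    simp only [decide_eq_true_eq] at hpred
    have : isInStringGo pairs i = true :=
      (isInStringGo_eq_true_iff pairs i).mpr ⟨p, hp, by omega, by omega⟩
    simp [hb] at this
  · obtain ⟨p, hp, hx, hy⟩ := (isInStringGo_eq_true_iff pairs i).mp hb
    have hpred : (fun p : Int × Int =>
        decide (max lo (p.1 + 1) < min n p.2 ∧ max lo (p.1 + 1) - lo < ((j + 1 : Nat) : Int) ∧ ((j + 1 : Nat) : Int) ≤ min n p.2 - lo)) p = true := by
      simp only [decide_eq_true_eq]
      constructor
      · omega
      constructor
      · omega
      · omega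
    have hpos : 0 < pairs.countP (fun p =>
        decide (max lo (p.1 + 1) < min n p.2 ∧ max lo (p.1 + 1) - lo < ((j + 1 : Nat) : Int) ∧ ((j + 1 : Nat) : Int) ≤ min n p.2 - lo)) :=
      List.countP_pos_iff.mpr ⟨p, hp, hpred⟩
    simp only [decide_eq_true_eq]
    exact_mod_cast hpos

-- ===== VERDICT (by name: the statement is the Claim_ definition above) =====
theorem FindBrackets_spec : Claim_equal_FindBrackets := by
  intro code starts ends position _ hpre
  unfold Pre_FindBrackets at hpre
  unfold Spec_FindBrackets FindBrackets FindBrackets_alt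
  apply loop_eq_scan
  · intro i hi
    rw [PySem.List.mem_pyRange_one] at hi
    rw [PySem.Str.len_eq] at hpre hi
    rw [Option.isSome_iff_ne_none]
    intro hnone
    rw [PySem.List.pyGet?_eq_none_iff] at hnone
    apply hnone
    unfold PySem.Raise.InRange
    omega
  · intro i hi
    rw [PySem.List.mem_pyRange_one] at hi
    exact mask_lookup _ _ _ _ hi.1 hi.2
  · simp
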